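-- pv_equiv track=rewrite | github.com/lvidalesg/AMMM_project | Greedy/greedy.py | is_pattern_valid
-- ===== SOURCE A (Python) =====
-- def is_pattern_valid(pattern, A_k):
--     """pattern: tuple of 7 bits (0/1). Validate circular runs of 1s: each run length in [2, A_k]."""
--     if sum(pattern) == 0:
--         return False
--     runs = []
--     cur = 0
--     for b in pattern:
--         if b == 1:
--             cur += 1
--         else:
--             if cur > 0:
--                 runs.append(cur)
--             cur = 0
--     if cur > 0:
--         runs.append(cur)
--     # if pattern starts and ends with 1, merge first and last (circular)
--     if pattern[0] == 1 and pattern[-1] == 1 and len(runs) >= 2: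
--         # first run is runs[0] (prefix), last run is runs[-1] (suffix)
--         merged = runs[0] + runs[-1]
--         # replace
--         runs = [merged] + runs[1:-1] if len(runs) > 2 else [merged]
--     # check each run's length bounds
--     for r in runs:
--         if r < 2 or r > A_k:
--             return False
--     return True
-- ===== SOURCE B (Python) =====
-- def is_pattern_valid(pattern, A_k):
--     """pattern: tuple of 7 bits (0/1). Validate circular runs of 1s: each run length in [2, A_k]."""
--     if sum(pattern) == 0:
--         return False
--     n = len(pattern)
--     if all(b == 1 for b in pattern):
--         # single circular run covering the whole pattern
--         return 2 <= n <= A_k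
--     # rotate so the list starts at a non-1 element: circular runs no longer straddle the boundary
--     i = next(j for j in range(n) if pattern[j] != 1)
--     rotated = pattern[i:] + pattern[:i]
--     cur = 0
--     for b in rotated:
--         if b == 1:
--             cur += 1
--         else:
--             if cur > 0 and not (2 <= cur <= A_k):
--                 return False
--             cur = 0
--     if cur > 0 and not (2 <= cur <= A_k):
--         return False
--     return True
-- ===== Notes on version B (the rewrite author's own statement) =====
-- stated objective: alternative
-- what changed: B rotates the pattern to start at a non-1 element (after special-casing sum==0 and all-ones) and validates runs in one linear scan with early exit, instead of collecting a runs list and merging the first and last run for the circular boundary.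
import Mathlib
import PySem

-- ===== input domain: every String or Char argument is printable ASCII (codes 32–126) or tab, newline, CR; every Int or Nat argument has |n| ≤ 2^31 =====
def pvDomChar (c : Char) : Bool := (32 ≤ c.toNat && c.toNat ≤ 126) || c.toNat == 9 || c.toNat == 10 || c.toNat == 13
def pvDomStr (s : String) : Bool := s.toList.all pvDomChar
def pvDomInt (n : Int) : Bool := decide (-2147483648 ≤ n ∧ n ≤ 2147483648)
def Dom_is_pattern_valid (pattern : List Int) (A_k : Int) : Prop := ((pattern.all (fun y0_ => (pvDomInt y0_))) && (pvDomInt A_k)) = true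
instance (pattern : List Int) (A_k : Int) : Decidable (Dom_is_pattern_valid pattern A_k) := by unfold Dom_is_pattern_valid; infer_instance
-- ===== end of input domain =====

-- B validates the circular 1-runs by rotating the list to start at a non-1 element (one linear
-- scan, no merge of border runs); objective: simpler decomposition, same cost.


-- ===== PORT A =====
-- the body of A's `for b in pattern` loop, state = (runs, cur)
def pvStepA (st : List Int × Int) (b : Int) : List Int × Int :=
  if b = 1 then (st.1, st.2 + 1)
  else if st.2 > 0 then (st.1 ++ [st.2], 0) else (st.1, 0)

-- runs after the loop and the trailing `if cur > 0: runs.append(cur)`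
def pvRunsA (pattern : List Int) : List Int :=
  if (pattern.foldl pvStepA ([], 0)).2 > 0
  then (pattern.foldl pvStepA ([], 0)).1 ++ [(pattern.foldl pvStepA ([], 0)).2]
  else (pattern.foldl pvStepA ([], 0)).1

-- the circular-merge step (`if pattern[0] == 1 and pattern[-1] == 1 and len(runs) >= 2: ...`);
-- the guard keeps the pyGet? calls in range, so .getD 0 is never taken on none
def pvMergeA (pattern runs : List Int) : List Int :=
  if PySem.List.pyGet? pattern 0 = some 1 ∧ PySem.List.pyGet? pattern (-1) = some 1 ∧ 2 ≤ runs.length then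
    (if 2 < runs.length
     then [(PySem.List.pyGet? runs 0).getD 0 + (PySem.List.pyGet? runs (-1)).getD 0]
            ++ PySem.List.slice runs (some 1) (some (-1))
     else [(PySem.List.pyGet? runs 0).getD 0 + (PySem.List.pyGet? runs (-1)).getD 0])
  else runs

-- the final `for r in runs: if r < 2 or r > A_k: return False` / `return True`
def pvCheckA (A_k : Int) : List Int → Bool
  | [] => true
  | r :: t => if r < 2 ∨ r > A_k then false else pvCheckA A_k t

def is_pattern_valid (pattern : List Int) (A_k : Int) : Bool :=
  if pattern.sum = 0 then false
  else pvCheckA A_k (pvMergeA pattern (pvRunsA pattern))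

-- ===== PORT B =====
-- B's run-length scan with early return (`for b in rotated: ...`)
def pvScanB (A_k : Int) : List Int → Int → Bool
  | [], cur => if cur > 0 ∧ ¬(2 ≤ cur ∧ cur ≤ A_k) then false else true
  | b :: t, cur =>
    if b = 1 then pvScanB A_k t (cur + 1)
    else if cur > 0 ∧ ¬(2 ≤ cur ∧ cur ≤ A_k) then false
    else pvScanB A_k t 0

def is_pattern_valid_alt (pattern : List Int) (A_k : Int) : Bool :=
  if pattern.sum = 0 then false
  else if pattern.all (fun b => b == 1) then
    decide (2 ≤ (pattern.length : Int) ∧ (pattern.length : Int) ≤ A_k)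
  else
    pvScanB A_k
      (PySem.List.slice pattern (some ((pattern.findIdx (fun b => b != 1) : Nat) : Int)) none
        ++ PySem.List.slice pattern none (some ((pattern.findIdx (fun b => b != 1) : Nat) : Int)))
      0

-- ===== PRECONDITION & SPEC =====
def Spec_is_pattern_valid (pattern : List Int) (A_k : Int) (out : Bool) : Prop := out = is_pattern_valid_alt pattern A_k
instance (pattern : List Int) (A_k : Int) (out : Bool) : Decidable (Spec_is_pattern_valid pattern A_k out) := by unfold Spec_is_pattern_valid; infer_instance

-- ===== CLAIM (what is proved, stated in full; the proofs are below) =====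
def Claim_equal_is_pattern_valid : Prop := ∀ (pattern : List Int) (A_k : Int), Dom_is_pattern_valid pattern A_k → Spec_is_pattern_valid pattern A_k (is_pattern_valid pattern A_k)

-- ===== LEMMAS AND PROOFS =====

/-- The run emitted at the end of a block of 1s (empty if no block was pending). -/
def pvEmit (cur : Int) : List Int := if cur > 0 then [cur] else []

/-- Run lengths of the maximal blocks of 1s, with `cur` ones already pending. -/
def pvRuns : List Int → Int → List Int
  | [], cur => pvEmit cur
  | b :: t, cur => if b = 1 then pvRuns t (cur + 1) else pvEmit cur ++ pvRuns t 0

lemma pvRuns_nil (cur : Int) : pvRuns [] cur = pvEmit cur := rfl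

lemma pvRuns_cons_one (t : List Int) (cur : Int) :
    pvRuns (1 :: t) cur = pvRuns t (cur + 1) := by simp [pvRuns]

lemma pvRuns_cons_ne (b : Int) (t : List Int) (cur : Int) (hb : ¬ b = 1) :
    pvRuns (b :: t) cur = pvEmit cur ++ pvRuns t 0 := by simp [pvRuns, hb]

lemma foldA_runs (l : List Int) : ∀ (acc : List Int) (cur : Int),
    (if (l.foldl pvStepA (acc, cur)).2 > 0
      then (l.foldl pvStepA (acc, cur)).1 ++ [(l.foldl pvStepA (acc, cur)).2]
      else (l.foldl pvStepA (acc, cur)).1) = acc ++ pvRuns l cur := by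
  induction l with
  | nil =>
    intro acc cur
    simp only [List.foldl_nil, pvRuns, pvEmit]
    split_ifs <;> simp
  | cons b t ih =>
    intro acc cur
    simp only [List.foldl_cons, pvRuns, pvStepA]
    by_cases hb : b = 1
    · simp [hb, ih]
    · simp only [if_neg hb]
      by_cases hc : cur > 0
      · simp [hc, ih, pvEmit]
      · simp [hc, ih, pvEmit]

lemma runsA_eq (pattern : List Int) : pvRunsA pattern = pvRuns pattern 0 := by
  have h := foldA_runs pattern [] 0
  simpa [pvRunsA] using h

lemma checkA_append (A_k : Int) (l1 l2 : List Int) :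
    pvCheckA A_k (l1 ++ l2) = (pvCheckA A_k l1 && pvCheckA A_k l2) := by
  induction l1 with
  | nil => simp [pvCheckA]
  | cons r t ih =>
    simp only [List.cons_append, pvCheckA]
    split_ifs <;> simp [ih]

lemma checkA_singleton (A_k c : Int) :
    pvCheckA A_k [c] = (decide (2 ≤ c) && decide (c ≤ A_k)) := by
  simp only [pvCheckA]
  split_ifs with h
  · rcases h with h | h
    · simp [decide_eq_false (show ¬ (2 ≤ c) by omega)]
    · simp [decide_eq_false (show ¬ (c ≤ A_k) by omega)]
  · have h2 : 2 ≤ c := by omega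
    have h3 : c ≤ A_k := by omega
    simp [h2, h3]

lemma scanB_eq (A_k : Int) (l : List Int) : ∀ (cur : Int),
    pvScanB A_k l cur = pvCheckA A_k (pvRuns l cur) := by
  induction l with
  | nil =>
    intro cur
    simp only [pvScanB, pvRuns, pvEmit]
    by_cases hc : cur > 0
    · simp only [if_pos hc, pvCheckA]
      split_ifs with h1 h2 <;> first | rfl | (exfalso; omega)
    · simp [hc, pvCheckA]
  | cons b t ih =>
    intro cur
    simp only [pvScanB, pvRuns]
    by_cases hb : b = 1
    · simp [hb, ih]
    · simp only [if_neg hb, checkA_append]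
      rw [ih 0]
      by_cases hc : cur > 0
      · simp only [pvEmit, if_pos hc, checkA_singleton]
        by_cases hok : 2 ≤ cur ∧ cur ≤ A_k
        · have hno : ¬ (cur > 0 ∧ ¬(2 ≤ cur ∧ cur ≤ A_k)) := by tauto
          simp [hno, hok.1, hok.2]
        · rw [if_pos ⟨hc, hok⟩]
          rcases not_and_or.mp hok with h | h
          · simp [decide_eq_false h]
          · simp [decide_eq_false h]
      · have hno : ¬ (cur > 0 ∧ ¬(2 ≤ cur ∧ cur ≤ A_k)) := by omega
        simp [pvEmit, hc, hno, pvCheckA]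

lemma runs_replicate (i : Nat) : ∀ (cur : Int), 0 ≤ cur → 0 < cur + i →
    pvRuns (List.replicate i 1) cur = [cur + i] := by
  induction i with
  | zero =>
    intro cur h0 h
    have hc : cur > 0 := by omega
    simp [pvRuns, pvEmit, hc]
  | succ n ih =>
    intro cur h0 h
    have hcast : cur + 1 + (n : Int) = cur + ((n + 1 : Nat) : Int) := by push_cast; ring
    rw [List.replicate_succ, pvRuns_cons_one, ih (cur + 1) (by omega) (by push_cast; omega),
      hcast]

lemma runs_replicate_append (i : Nat) (l : List Int) : ∀ (cur : Int),
    pvRuns (List.replicate i 1 ++ l) cur = pvRuns l (cur + i) := by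
  induction i with
  | zero => intro cur; simp
  | succ n ih =>
    intro cur
    have hcast : cur + 1 + (n : Int) = cur + ((n + 1 : Nat) : Int) := by push_cast; ring
    rw [List.replicate_succ, List.cons_append, pvRuns_cons_one, ih (cur + 1), hcast]

lemma runs_append_ones_ne_one (i : Nat) (hi : 0 < i) :
    ∀ (r : List Int) (cur : Int), 0 ≤ cur → r.getLast? ≠ some 1 → (r = [] → cur = 0) →
    pvRuns (r ++ List.replicate i 1) cur = pvRuns r cur ++ [(i : Int)] := by
  intro r
  induction r with
  | nil =>
    intro cur _ _ hnil
    have hc : cur = 0 := hnil rfl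
    subst hc
    rw [List.nil_append, runs_replicate i 0 le_rfl (by push_cast; omega), pvRuns_nil]
    simp [pvEmit]
  | cons b t ih =>
    intro cur h0 hlast hnil
    by_cases hb : b = 1
    · subst hb
      have ht : t ≠ [] := by
        intro h; subst h
        simp at hlast
      obtain ⟨c, t', rfl⟩ := List.exists_cons_of_ne_nil ht
      rw [List.cons_append, pvRuns_cons_one, pvRuns_cons_one]
      exact ih (cur + 1) (by omega) (by simpa [List.getLast?_cons_cons] using hlast)
        (fun h => absurd h (by simp))
    · rw [List.cons_append, pvRuns_cons_ne _ _ _ hb, pvRuns_cons_ne _ _ _ hb]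
      by_cases ht : t = []
      · subst ht
        rw [List.nil_append, runs_replicate i 0 le_rfl (by push_cast; omega), pvRuns_nil]
        simp [pvEmit]
      · rw [ih 0 le_rfl
          (by obtain ⟨c, t', rfl⟩ := List.exists_cons_of_ne_nil ht
              simpa [List.getLast?_cons_cons] using hlast)
          (fun h => absurd h ht)]
        simp

lemma runs_append_ones_one (i : Nat) :
    ∀ (r : List Int) (cur : Int), 0 ≤ cur → r.getLast? = some 1 →
    ∃ l j, pvRuns r cur = l ++ [j] ∧
      pvRuns (r ++ List.replicate i 1) cur = l ++ [j + (i : Int)] := by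
  intro r
  induction r with
  | nil => intro cur _ h; simp at h
  | cons b t ih =>
    intro cur h0 hlast
    by_cases ht : t = []
    · subst ht
      have hb : b = 1 := by simpa using hlast
      subst hb
      refine ⟨[], cur + 1, ?_, ?_⟩
      · rw [pvRuns_cons_one, pvRuns_nil]
        simp [pvEmit, show cur + 1 > 0 by omega]
      · rw [List.cons_append, List.nil_append, pvRuns_cons_one,
          runs_replicate i (cur + 1) (by omega) (by push_cast; omega)]
        simp
    · obtain ⟨c, t', rfl⟩ := List.exists_cons_of_ne_nil ht
      have hlast' : (c :: t').getLast? = some 1 := by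
        simpa [List.getLast?_cons_cons] using hlast
      by_cases hb : b = 1
      · subst hb
        obtain ⟨l, j, h1, h2⟩ := ih (cur + 1) (by omega) hlast'
        exact ⟨l, j, by rw [pvRuns_cons_one]; exact h1,
          by rw [List.cons_append, pvRuns_cons_one]; exact h2⟩
      · obtain ⟨l, j, h1, h2⟩ := ih 0 le_rfl hlast'
        refine ⟨pvEmit cur ++ l, j, ?_, ?_⟩
        · rw [pvRuns_cons_ne _ _ _ hb, h1, List.append_assoc]
        · rw [List.cons_append, pvRuns_cons_ne _ _ _ hb, h2, List.append_assoc]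

lemma pyGet?_zero (xs : List Int) : PySem.List.pyGet? xs 0 = xs[0]? := by
  cases xs with
  | nil => rfl
  | cons a t => simp [PySem.List.pyGet?, PySem.List.pyIdx?]

lemma pyGet?_neg_one (xs : List Int) (h : xs ≠ []) :
    PySem.List.pyGet? xs (-1) = xs.getLast? := by
  have h1 : 1 ≤ xs.length := List.length_pos_of_ne_nil h
  simp [PySem.List.pyGet?, PySem.List.pyIdx?, h1, List.getLast?_eq_getElem?]

lemma slice_one_negone (a b : Int) (l : List Int) :
    PySem.List.slice (a :: (l ++ [b])) (some 1) (some (-1)) = l := by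
  simp only [PySem.List.slice, PySem.List.clampIdx]
  norm_num
  rw [if_neg (by omega)]
  simp

/-- Core of the equivalence on a pattern decomposed as `1^i ++ x :: r` with `x ≠ 1`. -/
lemma rot_core (A_k : Int) (i : Nat) (x : Int) (r : List Int) (hx : ¬ x = 1) :
    pvCheckA A_k (pvMergeA (List.replicate i 1 ++ x :: r)
        (pvRuns (List.replicate i 1 ++ x :: r) 0))
      = pvCheckA A_k (pvRuns ((x :: r) ++ List.replicate i 1) 0) := by
  have hrunsP : pvRuns (List.replicate i 1 ++ x :: r) 0 = pvEmit (i : Int) ++ pvRuns r 0 := by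
    rw [runs_replicate_append, zero_add, pvRuns_cons_ne _ _ _ hx]
  have hrunsRot : pvRuns ((x :: r) ++ List.replicate i 1) 0
      = pvRuns (r ++ List.replicate i 1) 0 := by
    rw [List.cons_append, pvRuns_cons_ne _ _ _ hx]
    simp [pvEmit]
  rcases Nat.eq_zero_or_pos i with hi0 | hi0
  · subst hi0
    simp only [List.replicate_zero, List.nil_append, List.append_nil, Nat.cast_zero]
      at hrunsP hrunsRot ⊢
    have hc : ¬ (PySem.List.pyGet? (x :: r) 0 = some 1 ∧
        PySem.List.pyGet? (x :: r) (-1) = some 1 ∧ 2 ≤ (pvRuns (x :: r) 0).length) := by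
      rintro ⟨h0, -, -⟩
      rw [pyGet?_zero] at h0
      simp at h0
      exact hx h0
    simp only [pvMergeA, if_neg hc]
  · have hPne : List.replicate i (1 : Int) ++ x :: r ≠ [] := by simp
    have hEmit : pvEmit ((i : Nat) : Int) = [((i : Nat) : Int)] := by
      simp only [pvEmit]
      rw [if_pos (show ((i : Nat) : Int) > 0 by exact_mod_cast hi0)]
    have hnilruns : pvRuns ([] : List Int) 0 = [] := by simp [pvRuns, pvEmit]
    cases hgl : r.getLast? with
    | none =>
      have hr : r = [] := by simpa using hgl
      subst hr
      have hlast : (List.replicate i (1 : Int) ++ [x]).getLast? = some x := by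
        rw [List.getLast?_append]; rfl
      rw [hrunsP, hnilruns, List.append_nil, hEmit]
      have hnc : ¬ (PySem.List.pyGet? (List.replicate i (1 : Int) ++ [x]) 0 = some 1 ∧
          PySem.List.pyGet? (List.replicate i (1 : Int) ++ [x]) (-1) = some 1 ∧
          2 ≤ ([((i : Nat) : Int)]).length) := by
        rintro ⟨-, h1, -⟩
        rw [pyGet?_neg_one _ hPne, hlast] at h1
        exact hx (Option.some.inj h1)
      simp only [pvMergeA, if_neg hnc]
      rw [hrunsRot, List.nil_append, runs_replicate i 0 le_rfl (by push_cast; omega), zero_add]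
    | some b =>
      have hrne : r ≠ [] := by intro h; subst h; simp at hgl
      have hconsLast : (x :: r).getLast? = some b := by
        have h := List.getLast?_append (l := [x]) (l' := r)
        simpa [hgl] using h
      have hPlast : (List.replicate i (1 : Int) ++ x :: r).getLast? = some b := by
        rw [List.getLast?_append, hconsLast]; rfl
      have hhead : PySem.List.pyGet? (List.replicate i (1 : Int) ++ x :: r) 0 = some 1 := by
        rw [pyGet?_zero, List.getElem?_append_left (by simpa using hi0)]
        simp [hi0]
      by_cases hb : b = 1
      · subst hb
        obtain ⟨l, j, h1, h2⟩ := runs_append_ones_one i r 0 le_rfl hgl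
        have hruns1 : pvRuns (List.replicate i 1 ++ x :: r) 0 = (i : Int) :: (l ++ [j]) := by
          rw [hrunsP, h1, hEmit]; rfl
        have hget0 : (PySem.List.pyGet? ((i : Int) :: (l ++ [j])) 0).getD 0 = (i : Int) := by
          rw [pyGet?_zero]; rfl
        have hgetlast : (PySem.List.pyGet? ((i : Int) :: (l ++ [j])) (-1)).getD 0 = j := by
          rw [pyGet?_neg_one _ (by simp),
            show (i : Int) :: (l ++ [j]) = ((i : Int) :: l) ++ [j] from rfl,
            List.getLast?_concat]
          rfl
        rw [hruns1, hrunsRot, h2]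
        simp only [pvMergeA]
        rw [if_pos ⟨hhead, by rw [pyGet?_neg_one _ hPne]; exact hPlast, by simp⟩]
        by_cases hlen : 2 < ((i : Int) :: (l ++ [j])).length
        · rw [if_pos hlen, hget0, hgetlast, slice_one_negone, checkA_append, checkA_append,
            add_comm j (i : Int)]
          exact Bool.and_comm _ _
        · have hl0 : l = [] := by
            cases l with
            | nil => rfl
            | cons c t => exfalso; simp at hlen
          subst hl0
          rw [if_neg hlen, hget0, hgetlast]
          simp only [List.nil_append]
          rw [add_comm (i : Int) j]
      · have hc : ¬ (PySem.List.pyGet? (List.replicate i (1 : Int) ++ x :: r) 0 = some 1 ∧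
            PySem.List.pyGet? (List.replicate i (1 : Int) ++ x :: r) (-1) = some 1 ∧
            2 ≤ (pvRuns (List.replicate i 1 ++ x :: r) 0).length) := by
          rintro ⟨-, h1, -⟩
          rw [pyGet?_neg_one _ hPne, hPlast] at h1
          exact hb (Option.some.inj h1)
        simp only [pvMergeA, if_neg hc]
        rw [hrunsP, hrunsRot,
          runs_append_ones_ne_one i hi0 r 0 le_rfl (by rw [hgl]; simp [hb])
            (fun h => absurd h hrne),
          hEmit, checkA_append, checkA_append]
        exact Bool.and_comm _ _

lemma main_rot (pattern : List Int) (A_k : Int) (hs : ¬ pattern.sum = 0)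
    (hall : ¬ pattern.all (fun b => b == 1) = true) :
    is_pattern_valid pattern A_k = is_pattern_valid_alt pattern A_k := by
  have hex : ∃ b ∈ pattern, (b != 1) = true := by
    by_contra h
    push_neg at h
    apply hall
    rw [List.all_eq_true]
    intro b hb
    have hb1 : b = 1 := by simpa using h b hb
    simp [hb1]
  simp only [is_pattern_valid, is_pattern_valid_alt, if_neg hs, if_neg hall]
  rw [runsA_eq, scanB_eq]
  set I := pattern.findIdx (fun b => b != 1) with hIdef
  have hi : I < pattern.length := by rw [hIdef]; exact List.findIdx_lt_length.mpr hex
  obtain ⟨x, hx_eq, hx1⟩ : ∃ x, pattern[I]? = some x ∧ ¬ x = 1 := by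
    rw [hIdef]
    refine ⟨pattern[pattern.findIdx (fun b => b != 1)]'(List.findIdx_lt_length.mpr hex),
      List.getElem?_eq_getElem _, ?_⟩
    simpa using List.findIdx_getElem (w := List.findIdx_lt_length.mpr hex)
  have hxval : pattern[I]'hi = x := by
    have h2 := List.getElem?_eq_getElem (l := pattern) (i := I) hi
    rw [hx_eq] at h2
    exact (Option.some.inj h2).symm
  have htake : pattern.take I = List.replicate I (1 : Int) := by
    have hmem : ∀ b ∈ pattern.take I, b = 1 := by
      intro b hb
      obtain ⟨j, hj, rfl⟩ := List.getElem_of_mem hb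
      have hjI : j < I := by
        have hj' := hj
        rw [List.length_take] at hj'
        omega
      rw [List.getElem_take]
      have hfalse : (fun b => b != 1) pattern[j] = false := by
        rw [hIdef] at hjI
        exact List.not_of_lt_findIdx hjI
      simpa using hfalse
    have hlen : (pattern.take I).length = I := by
      rw [List.length_take]; omega
    calc pattern.take I = List.replicate (pattern.take I).length 1 :=
          List.eq_replicate_of_mem hmem
      _ = List.replicate I 1 := by rw [hlen]
  have hdropI : pattern.drop I = x :: pattern.drop (I + 1) := by
    rw [List.drop_eq_getElem_cons hi, hxval]
  have hdec : pattern = List.replicate I 1 ++ x :: pattern.drop (I + 1) := by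
    conv_lhs => rw [← List.take_append_drop I pattern]
    rw [htake, hdropI]
  have hslice : PySem.List.slice pattern (some (I : Int)) none
      ++ PySem.List.slice pattern none (some (I : Int))
      = (x :: pattern.drop (I + 1)) ++ List.replicate I 1 := by
    rw [PySem.List.slice_from pattern (Int.natCast_nonneg I),
      PySem.List.slice_to pattern (Int.natCast_nonneg I), Int.toNat_natCast,
      hdropI, htake]
  rw [hslice]
  conv_lhs => rw [hdec]
  exact rot_core A_k I x (pattern.drop (I + 1)) hx1

theorem main_thm (pattern : List Int) (A_k : Int) :
    is_pattern_valid pattern A_k = is_pattern_valid_alt pattern A_k := by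
  by_cases hs : pattern.sum = 0
  · simp [is_pattern_valid, is_pattern_valid_alt, hs]
  by_cases hall : pattern.all (fun b => b == 1) = true
  · have hne : pattern ≠ [] := by intro h; subst h; simp at hs
    have hrep : pattern = List.replicate pattern.length (1 : Int) := by
      apply List.eq_replicate_of_mem
      intro b hb
      have hb1 := List.all_eq_true.mp hall b hb
      simpa using hb1
    have hn : 0 < pattern.length := List.length_pos_of_ne_nil hne
    simp only [is_pattern_valid, is_pattern_valid_alt, if_neg hs, if_pos hall]
    rw [runsA_eq]
    rw [show pvRuns pattern 0 = [(pattern.length : Int)] by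
      conv_lhs => rw [hrep]
      rw [runs_replicate pattern.length 0 le_rfl (by push_cast; omega)]
      simp]
    rw [show pvMergeA pattern [(pattern.length : Int)] = [(pattern.length : Int)] from by
      simp only [pvMergeA]
      rw [if_neg (by rintro ⟨-, -, h⟩; simp at h)]]
    rw [checkA_singleton]
    by_cases h2 : 2 ≤ (pattern.length : Int)
    · by_cases h3 : (pattern.length : Int) ≤ A_k
      · simp [h2, h3]
      · simp [h2, h3]
    · simp [h2]
  · exact main_rot pattern A_k hs hall

-- ===== VERDICT (by name: the statement is the Claim_ definition above) =====
theorem is_pattern_valid_spec : Claim_equal_is_pattern_valid := by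
  intro pattern A_k _
  unfold Spec_is_pattern_valid
  exact main_thm pattern A_k
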